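-- pv_equiv track=rewrite | github.com/divcodes1121/cdp-support-agent | simple_server.py | handle_platform_query
-- ===== SOURCE A (Python) =====
-- CDP_INFO = {
--     "segment": {
--         "general": "Segment is a Customer Data Platform (CDP) that helps businesses collect, clean, and control customer data. It simplifies the process of tracking user data across multiple platforms and centralizes it for analysis and marketing use.",
--         "features": "Key features of Segment include: 1) Data collection across web, mobile, server, and cloud apps, 2) Identity resolution to create unified customer profiles, 3) Audience management for targeted marketing, 4) Real-time data processing, and 5) Integration with over 300 tools and platforms.",
--         "sources": "To set up a new source in Segment: 1) Log in to your Segment workspace, 2) Navigate to Sources and click 'Add Source', 3) Select the source type you want to add, 4) Configure the source settings and authentication, 5) Implement the tracking code if required, and 6) Verify data is flowing correctly using the Debugger."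
--     },
--     "mparticle": {
--         "general": "mParticle is a Customer Data Platform that helps companies collect and connect their data across devices, channels, and partners. It enables businesses to build a unified view of the customer journey.",
--         "features": "Key features of mParticle include: 1) Cross-platform data collection, 2) Identity management for customer recognition across touchpoints, 3) Audience segmentation tools, 4) Data filtering and validation, and 5) Real-time forwarding to over 300 integrations.",
--         "profiles": "To create a user profile in mParticle: 1) Implement the mParticle SDK in your application, 2) Set user identities using identifyUser() or similar methods, 3) Add user attributes using setUserAttribute(), 4) Track user events with logEvent(), and 5) Configure identity resolution settings in the mParticle dashboard."
--     },
--     "lytics": {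
--         "general": "Lytics is a Customer Data Platform that uses machine learning to build unified customer profiles and predict customer behaviors. It helps companies deliver personalized marketing experiences across various channels.",
--         "features": "Key features of Lytics include: 1) Behavioral scoring and predictive analytics, 2) Content affinity modeling, 3) Real-time personalization capabilities, 4) Machine learning for customer insights, and 5) Integration with major marketing platforms.",
--         "segments": "To build an audience segment in Lytics: 1) Log in to your Lytics account, 2) Navigate to 'Audiences' and click 'Create Audience', 3) Define your segment criteria using Lytics' behavioral attributes, 4) Use the visual interface to combine multiple conditions with AND/OR logic, 5) Preview your audience size and composition, and 6) Save and activate the segment for use in marketing campaigns."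
--     },
--     "zeotap": {
--         "general": "Zeotap is a Customer Intelligence Platform that helps brands better understand their customers and predict behaviors. It provides identity resolution, audience segmentation, and insights for marketers.",
--         "features": "Key features of Zeotap include: 1) Unified ID solution for identity resolution, 2) Deterministic data matching, 3) AI-powered customer analytics, 4) Consent management for privacy compliance, and 5) Integration with major advertising and marketing platforms.",
--         "integration": "To integrate your data with Zeotap: 1) Set up a Zeotap account and access the dashboard, 2) Configure data source connections in the 'Integrations' section, 3) Map your customer data fields to Zeotap's schema, 4) Establish secure data transfer using SFTP, S3, or API connections, 5) Set up regular data syncing schedules, and 6) Validate data flow using Zeotap's data quality reports."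
--     }
-- }
--
-- def handle_platform_query(platform, query):
--     """Handle a query about a specific platform."""
--     platform_info = CDP_INFO.get(platform, {})
--
--     # Check for how-to questions
--     if any(phrase in query for phrase in ["how to", "how do i", "steps to", "guide for"]):
--         if platform == "segment" and any(word in query for word in ["source", "set up", "setup", "configure"]):
--             return platform_info.get("sources", platform_info.get("general"))
--
--         if platform == "mparticle" and any(word in query for word in ["profile", "user", "identity"]):
--             return platform_info.get("profiles", platform_info.get("general"))
--
--         if platform == "lytics" and any(word in query for word in ["segment", "audience", "build"]):
--             return platform_info.get("segments", platform_info.get("general"))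
--
--         if platform == "zeotap" and any(word in query for word in ["integrate", "integration", "connect"]):
--             return platform_info.get("integration", platform_info.get("general"))
--
--     # Check for feature questions
--     if any(word in query for word in ["feature", "capabilities", "what can", "what does"]):
--         return platform_info.get("features", platform_info.get("general"))
--
--     # Default to general info about the platform
--     return platform_info.get("general", f"I have information about {platform.capitalize()}, but I'm not sure what specific aspect you're asking about. You can ask about features, how-to guides, or comparisons with other platforms.")
-- ===== SOURCE B (Python) =====
-- CDP_INFO = {
--     "segment": {
--         "general": "Segment is a Customer Data Platform (CDP) that helps businesses collect, clean, and control customer data. It simplifies the process of tracking user data across multiple platforms and centralizes it for analysis and marketing use.",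
--         "features": "Key features of Segment include: 1) Data collection across web, mobile, server, and cloud apps, 2) Identity resolution to create unified customer profiles, 3) Audience management for targeted marketing, 4) Real-time data processing, and 5) Integration with over 300 tools and platforms.",
--         "sources": "To set up a new source in Segment: 1) Log in to your Segment workspace, 2) Navigate to Sources and click 'Add Source', 3) Select the source type you want to add, 4) Configure the source settings and authentication, 5) Implement the tracking code if required, and 6) Verify data is flowing correctly using the Debugger."
--     },
--     "mparticle": {
--         "general": "mParticle is a Customer Data Platform that helps companies collect and connect their data across devices, channels, and partners. It enables businesses to build a unified view of the customer journey.",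
--         "features": "Key features of mParticle include: 1) Cross-platform data collection, 2) Identity management for customer recognition across touchpoints, 3) Audience segmentation tools, 4) Data filtering and validation, and 5) Real-time forwarding to over 300 integrations.",
--         "profiles": "To create a user profile in mParticle: 1) Implement the mParticle SDK in your application, 2) Set user identities using identifyUser() or similar methods, 3) Add user attributes using setUserAttribute(), 4) Track user events with logEvent(), and 5) Configure identity resolution settings in the mParticle dashboard."
--     },
--     "lytics": {
--         "general": "Lytics is a Customer Data Platform that uses machine learning to build unified customer profiles and predict customer behaviors. It helps companies deliver personalized marketing experiences across various channels.",
--         "features": "Key features of Lytics include: 1) Behavioral scoring and predictive analytics, 2) Content affinity modeling, 3) Real-time personalization capabilities, 4) Machine learning for customer insights, and 5) Integration with major marketing platforms.",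
--         "segments": "To build an audience segment in Lytics: 1) Log in to your Lytics account, 2) Navigate to 'Audiences' and click 'Create Audience', 3) Define your segment criteria using Lytics' behavioral attributes, 4) Use the visual interface to combine multiple conditions with AND/OR logic, 5) Preview your audience size and composition, and 6) Save and activate the segment for use in marketing campaigns."
--     },
--     "zeotap": {
--         "general": "Zeotap is a Customer Intelligence Platform that helps brands better understand their customers and predict behaviors. It provides identity resolution, audience segmentation, and insights for marketers.",
--         "features": "Key features of Zeotap include: 1) Unified ID solution for identity resolution, 2) Deterministic data matching, 3) AI-powered customer analytics, 4) Consent management for privacy compliance, and 5) Integration with major advertising and marketing platforms.",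
--         "integration": "To integrate your data with Zeotap: 1) Set up a Zeotap account and access the dashboard, 2) Configure data source connections in the 'Integrations' section, 3) Map your customer data fields to Zeotap's schema, 4) Establish secure data transfer using SFTP, S3, or API connections, 5) Set up regular data syncing schedules, and 6) Validate data flow using Zeotap's data quality reports."
--     }
-- }
--
-- HOWTO_PHRASES = ["how to", "how do i", "steps to", "guide for"]
--
-- # One flat, ordered rule list: (platform restriction or None, answer key,
-- # trigger keywords, whether a how-to phrase is required).  The function is a
-- # generic first-match rule scan over this list instead of a branch cascade.
-- ANSWER_RULES = [
--     ("segment", "sources", ["source", "set up", "setup", "configure"], True),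
--     ("mparticle", "profiles", ["profile", "user", "identity"], True),
--     ("lytics", "segments", ["segment", "audience", "build"], True),
--     ("zeotap", "integration", ["integrate", "integration", "connect"], True),
--     (None, "features", ["feature", "capabilities", "what can", "what does"], False),
-- ]
--
-- def handle_platform_query(platform, query):
--     """Handle a query about a specific platform (first-match rule scan)."""
--     howto = any(phrase in query for phrase in HOWTO_PHRASES)
--     for plat, key, words, needs_howto in ANSWER_RULES:
--         if (plat is None or plat == platform) and (howto or not needs_howto) \
--                 and any(word in query for word in words):
--             info = CDP_INFO.get(platform, {})
--             return info.get(key, info.get("general"))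
--     info = CDP_INFO.get(platform, {})
--     return info.get("general", f"I have information about {platform.capitalize()}, but I'm not sure what specific aspect you're asking about. You can ask about features, how-to guides, or comparisons with other platforms.")
-- ===== Notes on version B (the rewrite author's own statement) =====
-- stated objective: alternative
-- what changed: Replaces A's two-stage branch cascade (how-to block with four platform-specific ifs, then a feature if, then a default) by a single first-match scan over one flat ordered rule list of (platform restriction, answer key, trigger keywords, how-to-required) tuples, with the how-to test computed once as a flag consumed by each rule.
-- outside the precondition, e.g. on handle_platform_query('unknownplat', 'what can it do'): A returns None, B returns None
import Mathlib
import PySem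

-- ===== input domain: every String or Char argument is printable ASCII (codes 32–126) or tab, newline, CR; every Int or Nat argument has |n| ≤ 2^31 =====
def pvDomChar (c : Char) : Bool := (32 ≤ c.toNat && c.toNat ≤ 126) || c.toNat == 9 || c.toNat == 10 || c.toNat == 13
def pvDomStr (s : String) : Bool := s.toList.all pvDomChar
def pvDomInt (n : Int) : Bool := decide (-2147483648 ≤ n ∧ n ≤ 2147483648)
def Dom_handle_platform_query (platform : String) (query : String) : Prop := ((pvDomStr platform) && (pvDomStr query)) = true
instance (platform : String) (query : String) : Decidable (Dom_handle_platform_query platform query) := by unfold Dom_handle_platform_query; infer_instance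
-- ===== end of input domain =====

-- B replaces A's two-stage branch cascade by a single first-match scan over one flat
-- ordered rule list; objective: alternative. Return values agree on Pre_.

-- shared module-level data (the CDP_INFO dict of the Python module)
def pvTxt_segment_general : String := "Segment is a Customer Data Platform (CDP) that helps businesses collect, clean, and control customer data. It simplifies the process of tracking user data across multiple platforms and centralizes it for analysis and marketing use."
def pvTxt_segment_features : String := "Key features of Segment include: 1) Data collection across web, mobile, server, and cloud apps, 2) Identity resolution to create unified customer profiles, 3) Audience management for targeted marketing, 4) Real-time data processing, and 5) Integration with over 300 tools and platforms."
def pvTxt_segment_sources : String := "To set up a new source in Segment: 1) Log in to your Segment workspace, 2) Navigate to Sources and click 'Add Source', 3) Select the source type you want to add, 4) Configure the source settings and authentication, 5) Implement the tracking code if required, and 6) Verify data is flowing correctly using the Debugger."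
def pvTxt_mparticle_general : String := "mParticle is a Customer Data Platform that helps companies collect and connect their data across devices, channels, and partners. It enables businesses to build a unified view of the customer journey."
def pvTxt_mparticle_features : String := "Key features of mParticle include: 1) Cross-platform data collection, 2) Identity management for customer recognition across touchpoints, 3) Audience segmentation tools, 4) Data filtering and validation, and 5) Real-time forwarding to over 300 integrations."
def pvTxt_mparticle_profiles : String := "To create a user profile in mParticle: 1) Implement the mParticle SDK in your application, 2) Set user identities using identifyUser() or similar methods, 3) Add user attributes using setUserAttribute(), 4) Track user events with logEvent(), and 5) Configure identity resolution settings in the mParticle dashboard."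
def pvTxt_lytics_general : String := "Lytics is a Customer Data Platform that uses machine learning to build unified customer profiles and predict customer behaviors. It helps companies deliver personalized marketing experiences across various channels."
def pvTxt_lytics_features : String := "Key features of Lytics include: 1) Behavioral scoring and predictive analytics, 2) Content affinity modeling, 3) Real-time personalization capabilities, 4) Machine learning for customer insights, and 5) Integration with major marketing platforms."
def pvTxt_lytics_segments : String := "To build an audience segment in Lytics: 1) Log in to your Lytics account, 2) Navigate to 'Audiences' and click 'Create Audience', 3) Define your segment criteria using Lytics' behavioral attributes, 4) Use the visual interface to combine multiple conditions with AND/OR logic, 5) Preview your audience size and composition, and 6) Save and activate the segment for use in marketing campaigns."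
def pvTxt_zeotap_general : String := "Zeotap is a Customer Intelligence Platform that helps brands better understand their customers and predict behaviors. It provides identity resolution, audience segmentation, and insights for marketers."
def pvTxt_zeotap_features : String := "Key features of Zeotap include: 1) Unified ID solution for identity resolution, 2) Deterministic data matching, 3) AI-powered customer analytics, 4) Consent management for privacy compliance, and 5) Integration with major advertising and marketing platforms."
def pvTxt_zeotap_integration : String := "To integrate your data with Zeotap: 1) Set up a Zeotap account and access the dashboard, 2) Configure data source connections in the 'Integrations' section, 3) Map your customer data fields to Zeotap's schema, 4) Establish secure data transfer using SFTP, S3, or API connections, 5) Set up regular data syncing schedules, and 6) Validate data flow using Zeotap's data quality reports."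

def CDP_INFO : PySem.Dict String (PySem.Dict String String) :=
  PySem.Dict.mk [
    ("segment", PySem.Dict.mk [("general", pvTxt_segment_general), ("features", pvTxt_segment_features), ("sources", pvTxt_segment_sources)]),
    ("mparticle", PySem.Dict.mk [("general", pvTxt_mparticle_general), ("features", pvTxt_mparticle_features), ("profiles", pvTxt_mparticle_profiles)]),
    ("lytics", PySem.Dict.mk [("general", pvTxt_lytics_general), ("features", pvTxt_lytics_features), ("segments", pvTxt_lytics_segments)]),
    ("zeotap", PySem.Dict.mk [("general", pvTxt_zeotap_general), ("features", pvTxt_zeotap_features), ("integration", pvTxt_zeotap_integration)])]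

-- str.capitalize(): first char upper-cased, rest lower-cased (exact on ASCII, our domain)
def pyCapitalize (s : String) : String :=
  match s.toList with
  | [] => ""
  | c :: cs => String.ofList (PySem.Chars.upperChar c :: PySem.Chars.lower cs)

def pvDefaultMsg (platform : String) : String :=
  "I have information about " ++ pyCapitalize platform ++ ", but I'm not sure what specific aspect you're asking about. You can ask about features, how-to guides, or comparisons with other platforms."

-- ===== PORT A =====
-- shared fall-through of A (the code after the how-to if-block).
-- On excluded inputs (unknown platform + feature word) Python returns None; the port
-- yields "" there via .getD "" — those inputs are outside Pre_.
def pvA_tail (platform : String) (query : String) (platform_info : PySem.Dict String String) : String :=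
  if (["feature", "capabilities", "what can", "what does"].any (fun w => PySem.Str.isIn w query)) then
    ((platform_info.get? "features").or (platform_info.get? "general")).getD ""
  else
    (platform_info.get? "general").getD (pvDefaultMsg platform)

def handle_platform_query (platform : String) (query : String) : String :=
  let platform_info := (CDP_INFO.get? platform).getD (PySem.Dict.mk [])
  if (["how to", "how do i", "steps to", "guide for"].any (fun p => PySem.Str.isIn p query)) then
    if platform == "segment" && (["source", "set up", "setup", "configure"].any (fun w => PySem.Str.isIn w query)) then
      ((platform_info.get? "sources").or (platform_info.get? "general")).getD ""
    else if platform == "mparticle" && (["profile", "user", "identity"].any (fun w => PySem.Str.isIn w query)) then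
      ((platform_info.get? "profiles").or (platform_info.get? "general")).getD ""
    else if platform == "lytics" && (["segment", "audience", "build"].any (fun w => PySem.Str.isIn w query)) then
      ((platform_info.get? "segments").or (platform_info.get? "general")).getD ""
    else if platform == "zeotap" && (["integrate", "integration", "connect"].any (fun w => PySem.Str.isIn w query)) then
      ((platform_info.get? "integration").or (platform_info.get? "general")).getD ""
    else pvA_tail platform query platform_info
  else pvA_tail platform query platform_info

-- ===== PORT B =====
def HOWTO_PHRASES : List String := ["how to", "how do i", "steps to", "guide for"]

-- rule = (platform restriction or none, answer key, trigger keywords, how-to required)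
def ANSWER_RULES : List (Option String × String × List String × Bool) :=
  [ (some "segment", "sources", ["source", "set up", "setup", "configure"], true),
    (some "mparticle", "profiles", ["profile", "user", "identity"], true),
    (some "lytics", "segments", ["segment", "audience", "build"], true),
    (some "zeotap", "integration", ["integrate", "integration", "connect"], true),
    (none, "features", ["feature", "capabilities", "what can", "what does"], false) ]

-- the for-loop of B: first matching rule returns its answer; exhausted list falls to the default.
-- On excluded inputs (unknown platform + feature word) Python returns None; the port
-- yields "" there via .getD "" — those inputs are outside Pre_.
def pvB_loop (platform : String) (query : String) (howto : Bool) :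
    List (Option String × String × List String × Bool) → String
  | [] =>
    let info := (CDP_INFO.get? platform).getD (PySem.Dict.mk [])
    (info.get? "general").getD (pvDefaultMsg platform)
  | r :: rs =>
    if ((r.1.elim true (fun p => p == platform)) && (howto || !r.2.2.2)
        && r.2.2.1.any (fun w => PySem.Str.isIn w query)) then
      let info := (CDP_INFO.get? platform).getD (PySem.Dict.mk [])
      ((info.get? r.2.1).or (info.get? "general")).getD ""
    else pvB_loop platform query howto rs

def handle_platform_query_alt (platform : String) (query : String) : String :=
  let howto := HOWTO_PHRASES.any (fun p => PySem.Str.isIn p query)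
  pvB_loop platform query howto ANSWER_RULES

-- ===== PRECONDITION & SPEC =====
-- Pre_ excludes queries containing a feature keyword about a platform not in CDP_INFO:
-- there A returns None (not a str), not a value of the declared type.
def Pre_handle_platform_query (platform : String) (query : String) : Prop :=
  platform ∈ ["segment", "mparticle", "lytics", "zeotap"] ∨
  (["feature", "capabilities", "what can", "what does"].any (fun w => PySem.Str.isIn w query)) = false
instance (platform : String) (query : String) : Decidable (Pre_handle_platform_query platform query) := by unfold Pre_handle_platform_query; infer_instance

def pvWitness_handle_platform_query : String × String := ("segment", "how to set up a source")

def Spec_handle_platform_query (platform : String) (query : String) (out : String) : Prop := out = handle_platform_query_alt platform query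
instance (platform : String) (query : String) (out : String) : Decidable (Spec_handle_platform_query platform query out) := by unfold Spec_handle_platform_query; infer_instance

-- ===== CLAIM =====
def Claim_equal_handle_platform_query : Prop := ∀ (platform : String) (query : String), Dom_handle_platform_query platform query → Pre_handle_platform_query platform query → Spec_handle_platform_query platform query (handle_platform_query platform query)

-- ===== LEMMAS AND PROOFS =====

-- ===== VERDICT =====
-- merging A's nested how-to structure into B's single conjunction guard
theorem pv_if_merge {α : Type} (H K F : Prop) [Decidable H] [Decidable K] [Decidable F] (s t u : α) :
    (if H then (if K then s else (if F then t else u)) else (if F then t else u))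
      = (if H ∧ K then s else (if F then t else u)) := by
  by_cases hH : H <;> by_cases hK : K <;> simp [hH, hK]

set_option maxHeartbeats 1000000 in
theorem handle_platform_query_spec : Claim_equal_handle_platform_query := by
  intro platform query _ hpre
  unfold Spec_handle_platform_query
  unfold Pre_handle_platform_query at hpre
  by_cases h1 : platform = "segment"
  · subst h1
    simp only [handle_platform_query, handle_platform_query_alt, pvA_tail, pvB_loop,
      HOWTO_PHRASES, ANSWER_RULES]
    simp
    exact pv_if_merge _ _ _ _ _ _
  by_cases h2 : platform = "mparticle"
  · subst h2
    simp only [handle_platform_query, handle_platform_query_alt, pvA_tail, pvB_loop,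
      HOWTO_PHRASES, ANSWER_RULES]
    simp
    exact pv_if_merge _ _ _ _ _ _
  by_cases h3 : platform = "lytics"
  · subst h3
    simp only [handle_platform_query, handle_platform_query_alt, pvA_tail, pvB_loop,
      HOWTO_PHRASES, ANSWER_RULES]
    simp
    exact pv_if_merge _ _ _ _ _ _
  by_cases h4 : platform = "zeotap"
  · subst h4
    simp only [handle_platform_query, handle_platform_query_alt, pvA_tail, pvB_loop,
      HOWTO_PHRASES, ANSWER_RULES]
    simp
    exact pv_if_merge _ _ _ _ _ _
  -- platform not in CDP_INFO: Pre_ gives that no feature word occurs in the query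
  have hF : (["feature", "capabilities", "what can", "what does"].any
      (fun w => PySem.Str.isIn w query)) = false := by
    rcases hpre with hmem | hF
    · simp only [List.mem_cons] at hmem; tauto
    · exact hF
  simp [PySem.Str.isIn] at hF
  have e1 : ("segment" == platform) = false := beq_eq_false_iff_ne.mpr (Ne.symm h1)
  have e2 : ("mparticle" == platform) = false := beq_eq_false_iff_ne.mpr (Ne.symm h2)
  have e3 : ("lytics" == platform) = false := beq_eq_false_iff_ne.mpr (Ne.symm h3)
  have e4 : ("zeotap" == platform) = false := beq_eq_false_iff_ne.mpr (Ne.symm h4)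
  have f1 : (platform == "segment") = false := beq_eq_false_iff_ne.mpr h1
  have f2 : (platform == "mparticle") = false := beq_eq_false_iff_ne.mpr h2
  have f3 : (platform == "lytics") = false := beq_eq_false_iff_ne.mpr h3
  have f4 : (platform == "zeotap") = false := beq_eq_false_iff_ne.mpr h4
  simp [handle_platform_query, handle_platform_query_alt, pvA_tail, pvB_loop,
    HOWTO_PHRASES, ANSWER_RULES, PySem.Str.isIn, e1, e2, e3, e4, f1, f2, f3, f4, hF]
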